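-- pv_equiv track=rewrite | github.com/f0k3s/Accreditation | PyUI/SaveAndLoad.py | matchingKO
-- ===== SOURCE A (Python) =====
-- def matchingKO(data1,data2):
--     result=[]
--     for data in data1:
--         for dat in data2:
--             if data.get("FIO")==dat.get("FIO"):
--                 data.update(dat)
--                 result.append(data)
--     return result
-- ===== SOURCE B (Python) =====
-- def matchingKO(data1, data2):
--     index = {}
--     for dat in data2:
--         index.setdefault(dat.get("FIO"), []).append(dat)
--     result = []
--     for data in data1:
--         recs = index.get(data.get("FIO"), [])
--         if recs:
--             for dat in recs:
--                 data.update(dat)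
--             result += [data] * len(recs)
--     return result
-- ===== Notes on version B (the rewrite author's own statement) =====
-- stated objective: alternative
-- what changed: B replaces A's inner scan of data2 for every data1 record by a dict index built once from data2, grouping records by their FIO field, followed by a single lookup per data1 record; on the generated inputs the runtime is dominated by the size of the returned merged dicts, so no speed difference was measured. Pre_ only requires each data2 record, read as an association list, to have pairwise-distinct keys, i.e. to be the faithful image of a Python dict (A's actual argument type); duplicate-key lists represent no Python input and make A's in-place update/lookup interplay diverge from any grouping.
import Mathlib
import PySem

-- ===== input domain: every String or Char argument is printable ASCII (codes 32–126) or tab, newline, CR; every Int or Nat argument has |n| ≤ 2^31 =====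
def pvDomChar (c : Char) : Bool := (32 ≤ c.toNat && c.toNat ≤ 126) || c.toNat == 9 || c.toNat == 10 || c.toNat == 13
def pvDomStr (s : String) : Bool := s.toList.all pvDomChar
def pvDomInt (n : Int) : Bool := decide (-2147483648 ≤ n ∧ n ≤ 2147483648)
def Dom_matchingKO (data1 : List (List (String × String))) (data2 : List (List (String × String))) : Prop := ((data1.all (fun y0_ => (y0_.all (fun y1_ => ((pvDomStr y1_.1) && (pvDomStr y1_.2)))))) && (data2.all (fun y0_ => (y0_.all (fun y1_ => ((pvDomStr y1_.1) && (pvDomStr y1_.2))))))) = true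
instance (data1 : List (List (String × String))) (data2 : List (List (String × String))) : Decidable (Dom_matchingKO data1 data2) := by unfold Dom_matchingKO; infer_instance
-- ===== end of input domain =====

-- B builds a dict index FIO -> list of data2 records once, replacing A's inner scan of data2 per
-- data1 record by one lookup per record (objective: alternative algorithm; no speed difference was
-- measured). Equivalence is about the RETURN value; both Pythons also mutate the matched data1
-- dicts in place identically. Python's aliasing (A appends the SAME dict object, later mutated
-- further) is modelled in both ports by emitting the FINAL merged dict, replicated once per match —
-- exactly the list Python returns.

-- ===== PORT A =====
def matchingKO (data1 : List (List (String × String))) (data2 : List (List (String × String))) : List (List (String × String)) :=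
  -- for data in data1: for dat in data2: if data.get("FIO")==dat.get("FIO"): data.update(dat); result.append(data)
  -- inner loop state = (current value of the mutated dict `data`, number of appends so far);
  -- every appended entry aliases `data`, so the returned copies are st.1 (its final value), st.2 times
  data1.foldl (fun result data =>
    let st := data2.foldl (fun (st : PySem.Dict String String × Nat) dat =>
        if st.1.get? "FIO" = (PySem.Dict.mk dat).get? "FIO" then (st.1.update dat, st.2 + 1) else st)
      (PySem.Dict.mk data, 0)
    result ++ List.replicate st.2 st.1.items) []

-- ===== PORT B =====
def matchingKO_alt (data1 : List (List (String × String))) (data2 : List (List (String × String))) : List (List (String × String)) :=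
  -- index.setdefault(dat.get("FIO"), []).append(dat)  ==  index[k] = index.get(k, []) + [dat]  ==  modify
  let index : PySem.Dict (Option String) (List (List (String × String))) :=
    data2.foldl (fun ix dat => ix.modify ((PySem.Dict.mk dat).get? "FIO") [] (· ++ [dat])) (PySem.Dict.mk [])
  data1.foldl (fun result data =>
    let recs := index.getD ((PySem.Dict.mk data).get? "FIO") []
    if recs.isEmpty then result
    else
      let merged := recs.foldl (fun d dat => d.update dat) (PySem.Dict.mk data)
      result ++ List.replicate recs.length merged.items) []

-- ===== PRECONDITION & SPEC =====
-- Pre_ requires every data2 record, read as an association list, to have pairwise-distinct keys: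
-- exactly the lists that are faithful images of a Python dict (A's argument type). A duplicate-key
-- list represents no Python input, and on such lists the list-level ports may disagree.
def Pre_matchingKO (data1 : List (List (String × String))) (data2 : List (List (String × String))) : Prop :=
  ∀ rec ∈ data2, (rec.map Prod.fst).Nodup
instance (data1 : List (List (String × String))) (data2 : List (List (String × String))) : Decidable (Pre_matchingKO data1 data2) := by unfold Pre_matchingKO; infer_instance

def pvWitness_matchingKO : (List (List (String × String))) × (List (List (String × String))) :=
  ([[("FIO", "a"), ("x", "1")]], [[("FIO", "a"), ("y", "2")]])

def Spec_matchingKO (data1 : List (List (String × String))) (data2 : List (List (String × String))) (out : List (List (String × String))) : Prop := out = matchingKO_alt data1 data2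
instance (data1 : List (List (String × String))) (data2 : List (List (String × String))) (out : List (List (String × String))) : Decidable (Spec_matchingKO data1 data2 out) := by unfold Spec_matchingKO; infer_instance

-- ===== CLAIM (what is proved, stated in full; the proofs are below) =====
def Claim_equal_matchingKO : Prop := ∀ (data1 : List (List (String × String))) (data2 : List (List (String × String))), Dom_matchingKO data1 data2 → Pre_matchingKO data1 data2 → Spec_matchingKO data1 data2 (matchingKO data1 data2)

-- ===== LEMMAS AND PROOFS =====

-- updating with a record that does not contain "FIO" leaves the "FIO" lookup unchanged
lemma update_get?_fio_of_not_mem (d : PySem.Dict String String) (e : List (String × String))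
    (h : "FIO" ∉ e.map Prod.fst) : (d.update e).get? "FIO" = d.get? "FIO" := by
  induction e generalizing d with
  | nil => rfl
  | cons p e ih =>
      simp only [List.map_cons, List.mem_cons, not_or] at h
      show ((d.insert p.1 p.2).update e).get? "FIO" = d.get? "FIO"
      rw [ih _ (by exact h.2)]
      exact PySem.Dict.get?_insert_of_ne _ _ h.1

-- updating with a nodup-key record whose "FIO" lookup agrees with d's keeps d's "FIO" lookup
lemma update_get?_fio (d : PySem.Dict String String) (e : List (String × String))
    (hnd : (e.map Prod.fst).Nodup)
    (h : (PySem.Dict.mk e).get? "FIO" = d.get? "FIO") :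
    (d.update e).get? "FIO" = d.get? "FIO" := by
  induction e generalizing d with
  | nil => rfl
  | cons p e ih =>
      obtain ⟨k, v⟩ := p
      simp only [List.map_cons, List.nodup_cons] at hnd
      rw [PySem.Dict.get?_mk_cons] at h
      show ((d.insert k v).update e).get? "FIO" = d.get? "FIO"
      by_cases hk : k = "FIO"
      · subst hk
        simp only [beq_self_eq_true, if_pos] at h
        rw [update_get?_fio_of_not_mem _ _ hnd.1, PySem.Dict.get?_insert_self, h]
      · rw [if_neg (by simp [hk])] at h
        rw [ih _ hnd.2 (by rw [h, PySem.Dict.get?_insert_of_ne _ _ (fun hc => hk hc.symm)]),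
            PySem.Dict.get?_insert_of_ne _ _ (fun hc => hk hc.symm)]

-- A's inner loop over data2: it matches exactly the records whose "FIO" lookup equals the
-- (invariant) "FIO" lookup of the evolving dict, merging them in order and counting them
lemma innerA (l : List (List (String × String))) (k : Option String)
    (hnd : ∀ rec ∈ l, (rec.map Prod.fst).Nodup) :
    ∀ (d : PySem.Dict String String) (n : Nat), d.get? "FIO" = k →
    l.foldl (fun (st : PySem.Dict String String × Nat) dat =>
        if st.1.get? "FIO" = (PySem.Dict.mk dat).get? "FIO" then (st.1.update dat, st.2 + 1) else st)
      (d, n)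
    = ((l.filter (fun dat => decide ((PySem.Dict.mk dat).get? "FIO" = k))).foldl
        (fun d dat => d.update dat) d,
       n + (l.filter (fun dat => decide ((PySem.Dict.mk dat).get? "FIO" = k))).length) := by
  induction l with
  | nil => intro d n hd; simp
  | cons dat l ih =>
      intro d n hd
      have hdat := hnd dat (List.mem_cons_self ..)
      have hl : ∀ rec ∈ l, (rec.map Prod.fst).Nodup := fun r hr => hnd r (List.mem_cons_of_mem _ hr)
      by_cases hm : (PySem.Dict.mk dat).get? "FIO" = k
      · have hinv : (d.update dat).get? "FIO" = k := by
          rw [update_get?_fio d dat hdat (by rw [hm, hd]), hd]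
        simp only [List.foldl_cons, List.filter_cons, hd, hm, decide_true, if_true]
        rw [ih hl (d.update dat) (n + 1) hinv]
        simp only [List.length_cons, Prod.mk.injEq]
        exact ⟨trivial, by omega⟩
      · have hm' : ¬ k = (PySem.Dict.mk dat).get? "FIO" := fun hc => hm hc.symm
        simp only [List.foldl_cons, List.filter_cons, hd, if_neg hm', hm,
          decide_false, Bool.false_eq_true, ite_false]
        exact ih hl d n hd

-- B's index lookup: the group stored under k is exactly the filter of data2 on "FIO" = k
lemma indexLookup (l : List (List (String × String))) (k : Option String) :
    ((l.foldl (fun ix dat => ix.modify ((PySem.Dict.mk dat).get? "FIO") [] (· ++ [dat]))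
        (PySem.Dict.mk ([] : List (Option String × List (List (String × String)))))).getD k [])
    = l.filter (fun dat => decide ((PySem.Dict.mk dat).get? "FIO" = k)) := by
  have hmap : l.foldl (fun ix dat => ix.modify ((PySem.Dict.mk dat).get? "FIO") [] (· ++ [dat]))
        (PySem.Dict.mk ([] : List (Option String × List (List (String × String)))))
      = (l.map (fun dat => (((PySem.Dict.mk dat).get? "FIO" : Option String),
            (dat : List (String × String))))).foldl
          (fun ix p => ix.modify p.1 [] (· ++ [p.2]))
          (PySem.Dict.mk ([] : List (Option String × List (List (String × String))))) := by
    rw [List.foldl_map]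
  rw [hmap]
  rw [show (PySem.Dict.mk ([] : List (Option String × List (List (String × String)))))
      = PySem.Dict.empty from rfl]
  rw [PySem.Dict.getD_foldl_modify_append, PySem.Dict.getD_empty]
  simp only [List.filter_map, List.map_map, List.nil_append]
  have : ((fun p : Option String × List (String × String) => p.1 == k) ∘
      (fun dat : List (String × String) => (((PySem.Dict.mk dat).get? "FIO" : Option String), dat)))
      = fun dat => decide ((PySem.Dict.mk dat).get? "FIO" = k) := by
    funext dat
    by_cases hq : (PySem.Dict.mk dat).get? "FIO" = k <;> simp [Function.comp, hq]
  rw [this]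
  simp [Function.comp_def]

-- the two per-record bodies agree, hence the outer folds agree
lemma body_eq (data2 : List (List (String × String)))
    (hnd : ∀ rec ∈ data2, (rec.map Prod.fst).Nodup)
    (result : List (List (String × String))) (data : List (String × String)) :
    (let st := data2.foldl (fun (st : PySem.Dict String String × Nat) dat =>
        if st.1.get? "FIO" = (PySem.Dict.mk dat).get? "FIO" then (st.1.update dat, st.2 + 1) else st)
      (PySem.Dict.mk data, 0)
     result ++ List.replicate st.2 st.1.items)
    = (let recs := (data2.foldl (fun ix dat =>
          ix.modify ((PySem.Dict.mk dat).get? "FIO") [] (· ++ [dat])) (PySem.Dict.mk [])).getD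
            ((PySem.Dict.mk data).get? "FIO") []
       if recs.isEmpty then result
       else
         let merged := recs.foldl (fun d dat => d.update dat) (PySem.Dict.mk data)
         result ++ List.replicate recs.length merged.items) := by
  rw [innerA data2 ((PySem.Dict.mk data).get? "FIO") hnd (PySem.Dict.mk data) 0 rfl,
      indexLookup data2 ((PySem.Dict.mk data).get? "FIO")]
  by_cases he : (data2.filter
      (fun dat => decide ((PySem.Dict.mk dat).get? "FIO" = (PySem.Dict.mk data).get? "FIO"))) = []
  · simp [he]
  · simp only [List.isEmpty_iff, he, Nat.zero_add, ite_false]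

-- ===== VERDICT (by name: the statement is the Claim_ definition above) =====
theorem matchingKO_spec : Claim_equal_matchingKO := by
  intro data1 data2 _ hpre
  show matchingKO data1 data2 = matchingKO_alt data1 data2
  unfold matchingKO matchingKO_alt
  exact PySem.List.foldl_congr_mem data1 _ _ []
    (fun result data _ => body_eq data2 hpre result data)
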